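-- pv_equiv track=rewrite | github.com/haochencheng/Agents-Memory | agents_memory/services/integration.py | _doctor_overall
-- ===== SOURCE A (Python) =====
-- def _doctor_overall(checks: list[tuple[str, str, str]]) -> str:
--     required_statuses = [status for status, key, _ in checks if key not in {"agents_read_order", "copilot_activation", "profile_manifest", "refactor_watch"} and status != "INFO"]
--     if not required_statuses:
--         return "READY"
--     if all(status == "OK" for status in required_statuses):
--         return "READY"
--     if any(status == "OK" for status in required_statuses):
--         return "PARTIAL"
--     return "NOT_READY"
-- ===== SOURCE B (Python) =====
-- def _doctor_overall(checks: list[tuple[str, str, str]]) -> str: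
--     # Three-state automaton with early exit: return PARTIAL as soon as the
--     # stream of relevant statuses is seen to be mixed (an OK and a non-OK).
--     skip = frozenset({"agents_read_order", "copilot_activation", "profile_manifest", "refactor_watch"})
--     state = 0  # 0 = no relevant status yet, 1 = all OK so far, 2 = no OK so far
--     for status, key, _ in checks:
--         if key in skip or status == "INFO":
--             continue
--         ok = status == "OK"
--         if state == 0:
--             state = 1 if ok else 2
--         elif ok != (state == 1):
--             return "PARTIAL"
--     return "NOT_READY" if state == 2 else "READY"
-- ===== Notes on version B (the rewrite author's own statement) =====
-- stated objective: alternative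
-- what changed: Replaced the filtered-list plus all()/any() multi-scan approach with a single-pass three-state automaton (empty / all-OK-so-far / no-OK-so-far) that returns PARTIAL early at the first mixed pair of statuses, deciding READY/NOT_READY from the final state.
import Mathlib
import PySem

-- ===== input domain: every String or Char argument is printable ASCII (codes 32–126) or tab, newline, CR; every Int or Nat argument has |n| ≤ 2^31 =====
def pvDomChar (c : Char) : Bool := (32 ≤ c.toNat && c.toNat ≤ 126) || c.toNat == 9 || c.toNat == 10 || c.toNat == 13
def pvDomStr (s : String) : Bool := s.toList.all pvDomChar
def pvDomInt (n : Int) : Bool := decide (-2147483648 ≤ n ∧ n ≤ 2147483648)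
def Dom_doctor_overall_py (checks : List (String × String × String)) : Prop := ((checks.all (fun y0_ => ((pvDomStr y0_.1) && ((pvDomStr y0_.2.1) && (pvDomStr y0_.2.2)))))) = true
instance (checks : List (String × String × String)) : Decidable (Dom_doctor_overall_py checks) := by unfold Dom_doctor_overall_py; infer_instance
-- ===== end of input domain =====

-- B replaces A's filtered-list + all()/any() multi-scan with a single-pass three-state
-- automaton that exits early with PARTIAL at the first mixed pair (objective: alternative).


-- ===== PORT A =====
-- the literal set of excluded keys
def pvSkipKeys : PySem.Set String :=
  PySem.Set.ofList ["agents_read_order", "copilot_activation", "profile_manifest", "refactor_watch"]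

-- list comprehension: [status for status, key, _ in checks if key not in {...} and status != "INFO"]
def doctor_overall_py (checks : List (String × String × String)) : String :=
  let required_statuses :=
    checks.filterMap (fun x =>
      if ¬ x.2.1 ∈ pvSkipKeys ∧ x.1 ≠ "INFO" then some x.1 else none)
  if required_statuses = [] then "READY"
  else if required_statuses.all (fun status => status == "OK") then "READY"
  else if required_statuses.any (fun status => status == "OK") then "PARTIAL"
  else "NOT_READY"

-- ===== PORT B =====
-- Source B's loop as structural recursion carrying the automaton state
-- (0 = no relevant status yet, 1 = all OK so far, 2 = no OK so far);
-- the early `return "PARTIAL"` becomes a non-recursive branch.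
def pvAltGo : List (String × String × String) → Nat → String
  | [], state => if state = 2 then "NOT_READY" else "READY"
  | x :: rest, state =>
    if x.2.1 ∈ pvSkipKeys ∨ x.1 = "INFO" then pvAltGo rest state
    else
      let ok := x.1 == "OK"
      if state = 0 then pvAltGo rest (if ok then 1 else 2)
      else if ok ≠ (state == 1) then "PARTIAL"
      else pvAltGo rest state

def doctor_overall_py_alt (checks : List (String × String × String)) : String :=
  pvAltGo checks 0

-- ===== PRECONDITION & SPEC =====
def Spec_doctor_overall_py (checks : List (String × String × String)) (out : String) : Prop := out = doctor_overall_py_alt checks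
instance (checks : List (String × String × String)) (out : String) : Decidable (Spec_doctor_overall_py checks out) := by unfold Spec_doctor_overall_py; infer_instance

-- ===== CLAIM (what is proved, stated in full; the proofs are below) =====
def Claim_equal_doctor_overall_py : Prop := ∀ (checks : List (String × String × String)), Dom_doctor_overall_py checks → Spec_doctor_overall_py checks (doctor_overall_py checks)

-- ===== LEMMAS AND PROOFS =====

-- A's filtered list of statuses
def pvFilt (l : List (String × String × String)) : List String :=
  l.filterMap (fun x => if ¬ x.2.1 ∈ pvSkipKeys ∧ x.1 ≠ "INFO" then some x.1 else none)

-- the automaton, from each of its three states, computes A's scan results over the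
-- remaining filtered statuses
theorem pv_go_states (l : List (String × String × String)) :
    (pvAltGo l 1 = if (pvFilt l).all (fun s => s == "OK") then "READY" else "PARTIAL")
    ∧ (pvAltGo l 2 = if (pvFilt l).any (fun s => s == "OK") then "PARTIAL" else "NOT_READY")
    ∧ (pvAltGo l 0 =
        if pvFilt l = [] then "READY"
        else if (pvFilt l).all (fun s => s == "OK") then "READY"
        else if (pvFilt l).any (fun s => s == "OK") then "PARTIAL"
        else "NOT_READY") := by
  induction l with
  | nil => simp [pvAltGo, pvFilt]
  | cons x rest ih =>
    obtain ⟨ih1, ih2, ih0⟩ := ih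
    by_cases hskip : x.2.1 ∈ pvSkipKeys ∨ x.1 = "INFO"
    · have hneg : ¬ (¬ x.2.1 ∈ pvSkipKeys ∧ x.1 ≠ "INFO") := by tauto
      simp only [pvAltGo, pvFilt, List.filterMap_cons, if_neg hneg, if_pos hskip]
      exact ⟨ih1, ih2, ih0⟩
    · have hpos : (¬ x.2.1 ∈ pvSkipKeys ∧ x.1 ≠ "INFO") := by tauto
      have hcons : pvFilt (x :: rest) = x.1 :: pvFilt rest := by
        simp [pvFilt, hpos]
      by_cases hok : x.1 = "OK"
      · refine ⟨?_, ?_, ?_⟩ <;>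
          simp [pvAltGo, hpos.1, hok, hcons, ih1]
      · simp only [List.any_eq_true, beq_iff_eq, exists_eq_right] at ih2
        refine ⟨?_, ?_, ?_⟩ <;>
          simp [pvAltGo, hpos.1, hpos.2, hok, hcons, ih2]

-- ===== VERDICT (by name: the statement is the Claim_ definition above) =====
theorem doctor_overall_py_spec : Claim_equal_doctor_overall_py := by
  intro checks _
  unfold Spec_doctor_overall_py doctor_overall_py doctor_overall_py_alt
  simpa [pvFilt] using (pv_go_states checks).2.2.symm
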